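-- pv_equiv track=rewrite | github.com/lukesalamone/gomoku_rl | minimax_agent.py | static_eval
-- ===== SOURCE A (Python) =====
-- def static_eval(board):
--     def adj_block_score(streak):
--         scoreMatrix = [0, 2, 4, 8, 16, 32]
--         return 0 if (streak < 0 or streak >= len(scoreMatrix)) else scoreMatrix[streak]
--
--     def score_consec(square, current, streak, score):
--         if square != current:
--             if current == 0:
--                 current = square
--                 streak = 1
--             else:
--                 score += current * adj_block_score(streak)
--                 current = square
--                 streak = 1
--         else:
--             streak += 0 if square == 0 else 1
--         return {'current':current, 'streak':streak, 'score':score}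
--
--     def horizontal_score(board):
--         score = 0
--         for row in board:
--             current, streak = 0, 0
--             for square in row:
--                 current, streak, score = score_consec(square, current, streak, score).values()
--             score += current * adj_block_score(streak)
--         return -score
--
--     def vertical_score(board):
--         score = 0
--         for i in range(len(board[0])):
--             current, streak = 0, 0
--             for j in range(len(board)):
--                 current, streak, score = score_consec(board[j][i], current, streak, score).values()
--             score += current * adj_block_score(streak)
--         return -score
--
--     def diagonal_score(board):
--         score = 0
--         res = {'d1': {}, 'd2': {}, 'd3': {}, 'd4': {}}
--         L = len(board)
--         for i in range(4, L):
--             for key in res: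
--                 res[key] = {'streak': 0, 'current': 0, 'score': 0}
--             for j in range(0, i):
--                 res['d1'] = score_consec(board[i-j][j], res['d1']['current'],
--                                         res['d1']['streak'], res['d1']['score'])
--                 res['d2'] = score_consec(board[L-1-j][i-j], res['d2']['current'],
--                                         res['d2']['streak'], res['d2']['score'])
--                 res['d3'] = score_consec(board[j][L-1-i+j], res['d3']['current'],
--                                         res['d3']['streak'], res['d3']['score'])
--                 res['d4'] = score_consec(board[L-1-i+j][L-1-j], res['d4']['current'],
--                                         res['d4']['streak'], res['d4']['score'])
--             score += sum([x['score'] for x in res.values()])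
--         return -score
--
--     return horizontal_score(board) + vertical_score(board) + diagonal_score(board)
-- ===== SOURCE B (Python) =====
-- # B: extract every line (rows, columns, A's four diagonal families) as a list, then
-- # score each line by run-length encoding; diagonal lines omit their trailing run
-- # (A sums only the already-flushed score for diagonals).
-- def static_eval(board):
--     scoreMatrix = [0, 2, 4, 8, 16, 32]
--
--     def runs(line):
--         rs = []
--         for x in line:
--             if rs and rs[0][0] == x:
--                 rs[0] = (x, rs[0][1] + 1)
--             else:
--                 rs.insert(0, (x, 1))
--         rs.reverse()
--         return rs
--
--     def line_score(line, full):
--         rs = runs(line)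
--         if rs and not full and rs[-1][0] != 0:
--             rs = rs[:-1]
--         return sum(v * (scoreMatrix[n] if n < 6 else 0) for v, n in rs if v != 0)
--
--     L = len(board)
--     total = 0
--     for row in board:
--         total += line_score(row, True)
--     for i in range(len(board[0])):
--         total += line_score([board[j][i] for j in range(L)], True)
--     for i in range(4, L):
--         total += line_score([board[i - j][j] for j in range(i)], False)
--         total += line_score([board[L - 1 - j][i - j] for j in range(i)], False)
--         total += line_score([board[j][L - 1 - i + j] for j in range(i)], False)
--         total += line_score([board[L - 1 - i + j][L - 1 - j] for j in range(i)], False)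
--     return -total
-- ===== Notes on version B (the rewrite author's own statement) =====
-- stated objective: alternative
-- what changed: A threads a score_consec state machine (current, streak, score) through interleaved row/column/diagonal loops; B extracts each row, column and diagonal as a list, run-length encodes it in one pass, and sums value*scoreMatrix[len] over its runs, dropping the trailing run on diagonal lines (A only sums the flushed diagonal scores).
import Mathlib
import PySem

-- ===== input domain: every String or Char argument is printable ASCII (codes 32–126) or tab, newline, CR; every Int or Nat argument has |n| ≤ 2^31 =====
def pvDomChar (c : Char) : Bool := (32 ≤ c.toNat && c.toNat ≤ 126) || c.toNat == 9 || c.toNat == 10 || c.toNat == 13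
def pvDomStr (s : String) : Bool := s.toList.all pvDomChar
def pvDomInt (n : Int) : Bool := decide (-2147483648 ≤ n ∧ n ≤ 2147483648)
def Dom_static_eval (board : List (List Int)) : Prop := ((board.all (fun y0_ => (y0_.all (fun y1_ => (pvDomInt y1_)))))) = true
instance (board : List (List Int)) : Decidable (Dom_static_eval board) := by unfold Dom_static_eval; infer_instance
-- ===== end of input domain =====

-- B rewrites A's interleaved streak state machine as: extract each line (rows, columns,
-- A's four diagonal families), run-length encode it in one pass, and score its runs;
-- diagonal lines omit their trailing run (A sums only the flushed diagonal scores).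

-- board[j][i]; every index both programs use is a nonnegative in-range int under Pre_,
-- so Python's xs[idx] is exactly List.getD (the default is never taken inside Pre_)
def getCell (board : List (List Int)) (j i : Nat) : Int :=
  (board.getD j []).getD i 0

-- ===== PORT A =====
-- `0 if (streak < 0 or streak >= len(scoreMatrix)) else scoreMatrix[streak]`, len(scoreMatrix) = 6
def adjA (streak : Int) : Int :=
  if streak < 0 ∨ 6 ≤ streak then 0 else PySem.List.pyGetD [0, 2, 4, 8, 16, 32] streak 0

-- score_consec(square, current, streak, score) as state (current, streak, score)
def stepA (square : Int) (st : Int × Int × Int) : Int × Int × Int :=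
  if square ≠ st.1 then
    if st.1 = 0 then (square, 1, st.2.2)
    else (square, 1, st.2.2 + st.1 * adjA st.2.1)
  else (st.1, st.2.1 + (if square = 0 then 0 else 1), st.2.2)

-- `score += current * adj_block_score(streak)` after a line
def flushA (st : Int × Int × Int) : Int := st.2.2 + st.1 * adjA st.2.1

def hscoreA (board : List (List Int)) : Int :=
  -(board.foldl (fun score row => flushA (row.foldl (fun st sq => stepA sq st) (0, 0, score))) 0)

-- len(board[0]) raises on an empty board; Pre_ excludes it (getD's [] is never taken)
def vscoreA (board : List (List Int)) : Int :=
  -((List.range (board.getD 0 []).length).foldl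
      (fun score i =>
        flushA ((List.range board.length).foldl
          (fun st j => stepA (getCell board j i) st) (0, 0, score))) 0)

-- the j-loop body: res['d1'..'d4'] updated together (their scores are independent)
def dstepA (board : List (List Int)) (L i : Nat)
    (r : (Int × Int × Int) × (Int × Int × Int) × (Int × Int × Int) × (Int × Int × Int))
    (j : Nat) :
    (Int × Int × Int) × (Int × Int × Int) × (Int × Int × Int) × (Int × Int × Int) :=
  (stepA (getCell board (i - j) j) r.1,
   stepA (getCell board (L - 1 - j) (i - j)) r.2.1,
   stepA (getCell board j (L - 1 - i + j)) r.2.2.1,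
   stepA (getCell board (L - 1 - i + j) (L - 1 - j)) r.2.2.2)

-- range(4, L) = List.range' 4 (L - 4)
def dscoreA (board : List (List Int)) : Int :=
  -((List.range' 4 (board.length - 4)).foldl (fun score i =>
      let r := (List.range i).foldl (dstepA board board.length i)
        ((0, 0, 0), (0, 0, 0), (0, 0, 0), (0, 0, 0))
      score + (r.1.2.2 + r.2.1.2.2 + r.2.2.1.2.2 + r.2.2.2.2.2)) 0)

def static_eval (board : List (List Int)) : Int :=
  hscoreA board + vscoreA board + dscoreA board

-- ===== PORT B =====
-- `scoreMatrix[n] if n < 6 else 0`; the run length n is a count, carried as Nat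
def adjB (n : Nat) : Int := if n < 6 then List.getD [0, 2, 4, 8, 16, 32] n 0 else 0

-- one step of Source B's runs(): merge x into the head of the reversed run list
def runStepB (rs : List (Int × Nat)) (x : Int) : List (Int × Nat) :=
  match rs with
  | (w, n) :: more => if w = x then (x, n + 1) :: more else (x, 1) :: (w, n) :: more
  | [] => [(x, 1)]

def runsB (line : List Int) : List (Int × Nat) := (line.foldl runStepB []).reverse

def lineScoreB (line : List Int) (full : Bool) : Int :=
  let rs := runsB line
  let rs := if rs ≠ [] ∧ full = false ∧ (rs.getLastD (0, 0)).1 ≠ 0 then rs.dropLast else rs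
  ((rs.filter (fun p => p.1 ≠ 0)).map (fun p => p.1 * adjB p.2)).sum

def rowTotB (board : List (List Int)) : Int :=
  board.foldl (fun t row => t + lineScoreB row true) 0

def colTotB (board : List (List Int)) (t1 : Int) : Int :=
  (List.range (board.getD 0 []).length).foldl
    (fun t i =>
      t + lineScoreB ((List.range board.length).map
            (fun j => getCell board j i)) true) t1

def diagTotB (board : List (List Int)) (t2 : Int) : Int :=
  (List.range' 4 (board.length - 4)).foldl (fun t i =>
      t + lineScoreB ((List.range i).map
            (fun j => getCell board (i - j) j)) false
        + lineScoreB ((List.range i).map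
            (fun j => getCell board (board.length - 1 - j) (i - j))) false
        + lineScoreB ((List.range i).map
            (fun j => getCell board j (board.length - 1 - i + j))) false
        + lineScoreB ((List.range i).map
            (fun j => getCell board (board.length - 1 - i + j) (board.length - 1 - j))) false) t2

def static_eval_alt (board : List (List Int)) : Int :=
  -(diagTotB board (colTotB board (rowTotB board)))

-- ===== PRECONDITION & SPEC =====
def rowLen (board : List (List Int)) (j : Nat) : Nat := (board.getD j []).length

-- Exactly the inputs on which the Python A returns (no IndexError): a nonempty board
-- whose rows are long enough for every cell A's row/column/diagonal formulas index.
def Pre_static_eval (board : List (List Int)) : Prop :=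
  board ≠ [] ∧
  (∀ j ∈ List.range board.length, rowLen board 0 ≤ rowLen board j) ∧
  (∀ i ∈ List.range board.length, 4 ≤ i → ∀ j ∈ List.range i,
      j < rowLen board (i - j) ∧ i - j < rowLen board (board.length - 1 - j) ∧
      board.length - 1 - i + j < rowLen board j ∧
      board.length - 1 - j < rowLen board (board.length - 1 - i + j))

instance (board : List (List Int)) : Decidable (Pre_static_eval board) := by
  unfold Pre_static_eval; infer_instance

def pvWitness_static_eval : List (List Int) :=
  [[0, 1, 0, 0, -1], [1, 1, 0, 0, 0], [0, 0, -1, 0, 0], [0, 1, 0, 0, -1], [1, 0, 0, 1, 0]]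

def Spec_static_eval (board : List (List Int)) (out : Int) : Prop := out = static_eval_alt board
instance (board : List (List Int)) (out : Int) : Decidable (Spec_static_eval board out) := by
  unfold Spec_static_eval; infer_instance

-- ===== CLAIM (what is proved, stated in full; the proofs are below) =====
def Claim_equal_static_eval : Prop := ∀ (board : List (List Int)), Dom_static_eval board → Pre_static_eval board → Spec_static_eval board (static_eval board)

-- ===== LEMMAS AND PROOFS =====

-- structural (right-to-left) characterization of runsB
def runsS : List Int → List (Int × Nat)
  | [] => []
  | x :: xs =>
    match runsS xs with
    | (w, n) :: more => if w = x then (x, n + 1) :: more else (x, 1) :: (w, n) :: more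
    | [] => [(x, 1)]

theorem runsS_cons_nil {xs : List Int} (x : Int) (h : runsS xs = []) :
    runsS (x :: xs) = [(x, 1)] := by simp only [runsS]; rw [h]

theorem runsS_cons_merge {xs : List Int} {x : Int} {n : Nat} {more : List (Int × Nat)}
    (h : runsS xs = (x, n) :: more) : runsS (x :: xs) = (x, n + 1) :: more := by
  simp only [runsS]; rw [h]; simp

theorem runsS_cons_new {xs : List Int} {w x : Int} {n : Nat} {more : List (Int × Nat)}
    (h : runsS xs = (w, n) :: more) (hw : w ≠ x) :
    runsS (x :: xs) = (x, 1) :: (w, n) :: more := by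
  simp only [runsS]; rw [h]; simp [hw]

theorem runStepB_merge (x : Int) (n : Nat) (acc : List (Int × Nat)) :
    runStepB ((x, n) :: acc) x = (x, n + 1) :: acc := by simp [runStepB]

theorem runStepB_new {w x : Int} (n : Nat) (acc : List (Int × Nat)) (hw : w ≠ x) :
    runStepB ((w, n) :: acc) x = (x, 1) :: (w, n) :: acc := by simp [runStepB, hw]

theorem runsS_cons (x : Int) (xs : List Int) :
    ∃ n rest, runsS (x :: xs) = (x, n) :: rest ∧ 1 ≤ n := by
  rcases h : runsS xs with _ | ⟨⟨w, n⟩, more⟩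
  · exact ⟨1, [], runsS_cons_nil x h, le_refl _⟩
  · by_cases hw : w = x
    · subst hw; exact ⟨n + 1, more, runsS_cons_merge h, by omega⟩
    · exact ⟨1, (w, n) :: more, runsS_cons_new h hw, le_refl _⟩

theorem runsS_replicate (w : Int) (n : Nat) (hn : 1 ≤ n) :
    runsS (List.replicate n w) = [(w, n)] := by
  induction n with
  | zero => omega
  | succ m ih =>
    by_cases hm : 1 ≤ m
    · rw [List.replicate_succ]
      rw [runsS_cons_merge (ih hm)]
    · have : m = 0 := by omega
      subst this
      exact runsS_cons_nil w rfl

theorem runsS_replicate_append (c x : Int) (n : Nat) (xs : List Int)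
    (hn : 1 ≤ n) (hx : x ≠ c) :
    runsS (List.replicate n c ++ x :: xs) = (c, n) :: runsS (x :: xs) := by
  induction n with
  | zero => omega
  | succ m ih =>
    by_cases hm : 1 ≤ m
    · rw [List.replicate_succ, List.cons_append, runsS_cons_merge (ih hm)]
    · have hm0 : m = 0 := by omega
      subst hm0
      show runsS (c :: x :: xs) = (c, 1) :: runsS (x :: xs)
      obtain ⟨k, rest, hk, -⟩ := runsS_cons x xs
      rw [runsS_cons_new hk hx, ← hk]

theorem foldl_runStepB (line : List Int) :
    ∀ (w : Int) (n : Nat) (acc : List (Int × Nat)), 1 ≤ n →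
      (line.foldl runStepB ((w, n) :: acc)).reverse
        = acc.reverse ++ runsS (List.replicate n w ++ line) := by
  induction line with
  | nil =>
    intro w n acc hn
    simp [runsS_replicate w n hn]
  | cons x xs ih =>
    intro w n acc hn
    by_cases hwx : w = x
    · subst hwx
      have h1 : List.replicate n w ++ w :: xs = List.replicate (n + 1) w ++ xs := by
        rw [List.replicate_succ']; simp
      rw [List.foldl_cons, runStepB_merge, ih w (n + 1) acc (by omega), h1]
    · rw [List.foldl_cons, runStepB_new n acc hwx, ih x 1 ((w, n) :: acc) (le_refl _),
          runsS_replicate_append w x n xs hn (Ne.symm hwx)]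
      simp

theorem runsB_eq (line : List Int) : runsB line = runsS line := by
  cases line with
  | nil => rfl
  | cons x xs =>
    show (List.foldl runStepB (runStepB [] x) xs).reverse = _
    have h0 : runStepB [] x = [(x, 1)] := rfl
    rw [h0, foldl_runStepB xs x 1 [] (le_refl _)]
    simp

def sumR (rs : List (Int × Nat)) : Int :=
  ((rs.filter (fun p => p.1 ≠ 0)).map (fun p => p.1 * adjB p.2)).sum

def dropT (rs : List (Int × Nat)) : List (Int × Nat) :=
  if (rs.getLastD (0, 0)).1 ≠ 0 then rs.dropLast else rs

def Sfull (line : List Int) : Int := sumR (runsS line)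
def Sdrop (line : List Int) : Int := sumR (dropT (runsS line))

theorem lineScoreB_full (line : List Int) : lineScoreB line true = Sfull line := by
  simp [lineScoreB, runsB_eq, Sfull, sumR]

theorem lineScoreB_drop (line : List Int) : lineScoreB line false = Sdrop line := by
  unfold lineScoreB Sdrop dropT sumR
  rw [runsB_eq]
  rcases h : runsS line with _ | ⟨⟨w, n⟩, rest⟩
  · simp
  · simp only [ne_eq, reduceCtorEq, not_false_eq_true, true_and]

theorem adj_eq (n : Nat) : adjA (n : Int) = adjB n := by
  unfold adjA adjB
  rw [PySem.List.pyGetD_natCast]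
  by_cases h : n < 6
  · rw [if_neg (by omega), if_pos h]
  · rw [if_pos (by omega), if_neg h]

theorem sumR_cons_zero (n : Nat) (rest : List (Int × Nat)) :
    sumR ((0, n) :: rest) = sumR rest := by simp [sumR]

theorem sumR_cons_nonzero (c : Int) (n : Nat) (rest : List (Int × Nat)) (hc : c ≠ 0) :
    sumR ((c, n) :: rest) = c * adjB n + sumR rest := by simp [sumR, hc]

theorem Sfull_zero_cons (xs : List Int) : Sfull (0 :: xs) = Sfull xs := by
  unfold Sfull
  rcases h : runsS xs with _ | ⟨⟨w, n⟩, more⟩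
  · rw [runsS_cons_nil 0 h]; simp [sumR]
  · by_cases hw : w = 0
    · subst hw
      rw [runsS_cons_merge h, sumR_cons_zero, sumR_cons_zero]
    · rw [runsS_cons_new h hw, sumR_cons_zero]

theorem getLastD_cons_of_ne_nil {α : Type} (a d : α) (l : List α) (h : l ≠ []) :
    (a :: l).getLastD d = l.getLastD d := by
  cases l with
  | nil => exact absurd rfl h
  | cons b t => simp

theorem sumR_dropT_zero_cons (n : Nat) (q : Int × Nat) (qs : List (Int × Nat)) :
    sumR (dropT ((0, n) :: q :: qs)) = sumR (dropT (q :: qs)) := by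
  unfold dropT
  rw [getLastD_cons_of_ne_nil (0, n) (0, 0) (q :: qs) (List.cons_ne_nil q qs)]
  rw [show ((0, n) :: q :: qs).dropLast = (0, n) :: (q :: qs).dropLast from rfl]
  split_ifs with hl
  · rw [sumR_cons_zero]
  · rw [sumR_cons_zero]

theorem Sdrop_zero_cons (xs : List Int) : Sdrop (0 :: xs) = Sdrop xs := by
  unfold Sdrop
  rcases h : runsS xs with _ | ⟨⟨w, n⟩, more⟩
  · rw [runsS_cons_nil 0 h]; simp [dropT, sumR]
  · by_cases hw : w = 0
    · subst hw
      rw [runsS_cons_merge h]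
      rcases more with _ | ⟨q, qs⟩
      · simp [dropT, sumR]
      · rw [sumR_dropT_zero_cons, sumR_dropT_zero_cons]
    · rw [runsS_cons_new h hw, sumR_dropT_zero_cons]

theorem Sfull_rep_cons (c x : Int) (n : Nat) (xs : List Int)
    (hc : c ≠ 0) (hn : 1 ≤ n) (hx : x ≠ c) :
    Sfull (List.replicate n c ++ x :: xs) = c * adjB n + Sfull (x :: xs) := by
  unfold Sfull
  rw [runsS_replicate_append c x n xs hn hx, sumR_cons_nonzero _ _ _ hc]

theorem Sdrop_rep_cons (c x : Int) (n : Nat) (xs : List Int)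
    (hc : c ≠ 0) (hn : 1 ≤ n) (hx : x ≠ c) :
    Sdrop (List.replicate n c ++ x :: xs) = c * adjB n + Sdrop (x :: xs) := by
  unfold Sdrop
  rw [runsS_replicate_append c x n xs hn hx]
  obtain ⟨m, rest, hm, -⟩ := runsS_cons x xs
  rw [hm]
  unfold dropT
  rw [getLastD_cons_of_ne_nil _ _ _ (by simp)]
  split_ifs with hl
  · rw [List.dropLast_cons_of_ne_nil (by simp), sumR_cons_nonzero _ _ _ hc]
  · rw [sumR_cons_nonzero _ _ _ hc]

theorem Sfull_rep (c : Int) (n : Nat) (hc : c ≠ 0) (hn : 1 ≤ n) :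
    Sfull (List.replicate n c) = c * adjB n := by
  unfold Sfull
  rw [runsS_replicate c n hn, sumR_cons_nonzero _ _ _ hc]
  simp [sumR]

theorem Sdrop_rep (c : Int) (n : Nat) (hc : c ≠ 0) (hn : 1 ≤ n) :
    Sdrop (List.replicate n c) = 0 := by
  unfold Sdrop
  rw [runsS_replicate c n hn]
  simp [dropT, hc, sumR]

def foldCons (st : Int × Int × Int) (line : List Int) : Int × Int × Int :=
  line.foldl (fun s x => stepA x s) st

-- the joint invariant: A's streak state machine computes B's run scores
theorem main_inv (line : List Int) :
    (∀ (k s : Int),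
        flushA (foldCons (0, k, s) line) = s + Sfull line
      ∧ (foldCons (0, k, s) line).2.2 = s + Sdrop line)
  ∧ (∀ (c : Int) (n : Nat) (s : Int), c ≠ 0 → 1 ≤ n →
        flushA (foldCons (c, (n : Int), s) line) = s + Sfull (List.replicate n c ++ line)
      ∧ (foldCons (c, (n : Int), s) line).2.2 = s + Sdrop (List.replicate n c ++ line)) := by
  induction line with
  | nil =>
    constructor
    · intro k s
      constructor <;> simp [foldCons, flushA, Sfull, Sdrop, runsS, sumR, dropT]
    · intro c n s hc hn
      constructor
      · simp [foldCons, flushA, adj_eq, Sfull_rep c n hc hn]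
      · simp [foldCons, Sdrop_rep c n hc hn]
  | cons x xs ih =>
    constructor
    · intro k s
      by_cases hx : x = 0
      · subst hx
        have h0 : foldCons (0, k, s) (0 :: xs) = foldCons (0, k + 0, s) xs := by
          simp [foldCons, stepA]
        rw [h0, Sfull_zero_cons, Sdrop_zero_cons]
        exact ⟨(ih.1 (k + 0) s).1, (ih.1 (k + 0) s).2⟩
      · have h0 : foldCons (0, k, s) (x :: xs) = foldCons (x, ((1 : Nat) : Int), s) xs := by
          simp [foldCons, stepA, hx]
        have h1 := ih.2 x 1 s hx (le_refl _)
        rw [h0]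
        simpa using h1
    · intro c n s hc hn
      by_cases hx : x = c
      · subst hx
        have h0 : foldCons (x, (n : Int), s) (x :: xs)
            = foldCons (x, ((n + 1 : Nat) : Int), s) xs := by
          simp [foldCons, stepA, hc]
        have h1 : List.replicate n x ++ x :: xs = List.replicate (n + 1) x ++ xs := by
          rw [List.replicate_succ']; simp
        rw [h0, h1]
        exact ih.2 x (n + 1) s hc (by omega)
      · have h0 : foldCons (c, (n : Int), s) (x :: xs)
            = foldCons (x, ((1 : Nat) : Int), s + c * adjB n) xs := by
          simp [foldCons, stepA, hx, adj_eq, hc]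
        by_cases hx0 : x = 0
        · subst hx0
          rw [h0, Sfull_rep_cons c 0 n xs hc hn hx, Sdrop_rep_cons c 0 n xs hc hn hx,
              Sfull_zero_cons, Sdrop_zero_cons]
          have h3 := ih.1 ((1 : Nat) : Int) (s + c * adjB n)
          constructor
          · rw [h3.1]; ring
          · rw [h3.2]; ring
        · have h3 := ih.2 x 1 (s + c * adjB n) hx0 (le_refl _)
          rw [h0, Sfull_rep_cons c x n xs hc hn hx, Sdrop_rep_cons c x n xs hc hn hx]
          constructor
          · have h4 := h3.1
            simp only [List.replicate_one, List.singleton_append] at h4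
            rw [h4]; ring
          · have h4 := h3.2
            simp only [List.replicate_one, List.singleton_append] at h4
            rw [h4]; ring

theorem line_full (line : List Int) (s : Int) :
    flushA (foldCons (0, 0, s) line) = s + lineScoreB line true := by
  rw [lineScoreB_full]; exact ((main_inv line).1 0 s).1

theorem line_drop (line : List Int) (s : Int) :
    (foldCons (0, 0, s) line).2.2 = s + lineScoreB line false := by
  rw [lineScoreB_drop]; exact ((main_inv line).1 0 s).2

-- a score-threading fold is a fold of per-element contributions
theorem foldl_shift {α : Type} (f : Int → α → Int) (u : α → Int)
    (h : ∀ s i, f s i = s + u i) :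
    ∀ (l : List α) (s : Int), l.foldl f s = l.foldl (fun t i => t + u i) s := by
  intro l
  induction l with
  | nil => intro s; rfl
  | cons i tl ih =>
    intro s
    rw [List.foldl_cons, List.foldl_cons, h s i, ih]

theorem foldl_init {α : Type} (f : Int → α → Int) (h : ∀ s t i, f (s + t) i = s + f t i) :
    ∀ (l : List α) (s : Int), l.foldl f s = s + l.foldl f 0 := by
  intro l
  induction l with
  | nil => intro s; simp
  | cons i tl ih =>
    intro s
    rw [List.foldl_cons, List.foldl_cons]
    have e : f s i = s + f 0 i := by
      have h2 := h s 0 i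
      simpa using h2
    rw [e, ih (s + f 0 i), ih (f 0 i)]
    ring

theorem dfold_split (board : List (List Int)) (L i : Nat) :
    ∀ (l : List Nat) (r1 r2 r3 r4 : Int × Int × Int),
      l.foldl (dstepA board L i) (r1, r2, r3, r4)
        = (l.foldl (fun st j => stepA (getCell board (i - j) j) st) r1,
           l.foldl (fun st j => stepA (getCell board (L - 1 - j) (i - j)) st) r2,
           l.foldl (fun st j => stepA (getCell board j (L - 1 - i + j)) st) r3,
           l.foldl (fun st j => stepA (getCell board (L - 1 - i + j) (L - 1 - j)) st) r4) := by
  intro l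
  induction l with
  | nil => intro r1 r2 r3 r4; rfl
  | cons j tl ih =>
    intro r1 r2 r3 r4
    rw [List.foldl_cons, List.foldl_cons, List.foldl_cons, List.foldl_cons, List.foldl_cons]
    exact ih _ _ _ _

theorem foldl_stepA_map {α : Type} (f : α → Int) (l : List α) (st : Int × Int × Int) :
    l.foldl (fun st j => stepA (f j) st) st = foldCons st (l.map f) := by
  rw [foldCons, List.foldl_map]

theorem hscoreA_eq (board : List (List Int)) : hscoreA board = -(rowTotB board) := by
  unfold hscoreA rowTotB
  congr 1
  exact foldl_shift _ (fun row => lineScoreB row true)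
    (fun s row => line_full row s) board 0

theorem vscoreA_eq (board : List (List Int)) :
    vscoreA board = -(colTotB board 0) := by
  unfold vscoreA colTotB
  rw [foldl_shift _
        (fun i => lineScoreB ((List.range board.length).map
          (fun j => getCell board j i)) true)
        (fun s i => by rw [foldl_stepA_map]; exact line_full _ s) _ 0]

theorem dscoreA_eq (board : List (List Int)) :
    dscoreA board = -(diagTotB board 0) := by
  unfold dscoreA diagTotB
  have hA : ∀ (s : Int) (i : Nat),
      (let r := (List.range i).foldl (dstepA board board.length i)
        ((0, 0, 0), (0, 0, 0), (0, 0, 0), (0, 0, 0))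
       s + (r.1.2.2 + r.2.1.2.2 + r.2.2.1.2.2 + r.2.2.2.2.2))
      = s + (lineScoreB ((List.range i).map (fun j => getCell board (i - j) j)) false
           + lineScoreB ((List.range i).map (fun j => getCell board (board.length - 1 - j) (i - j))) false
           + lineScoreB ((List.range i).map (fun j => getCell board j (board.length - 1 - i + j))) false
           + lineScoreB ((List.range i).map (fun j => getCell board (board.length - 1 - i + j) (board.length - 1 - j))) false) := by
    intro s i
    rw [dfold_split board board.length i]
    simp only [foldl_stepA_map]
    have e1 := line_drop ((List.range i).map (fun j => getCell board (i - j) j)) 0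
    have e2 := line_drop ((List.range i).map (fun j => getCell board (board.length - 1 - j) (i - j))) 0
    have e3 := line_drop ((List.range i).map (fun j => getCell board j (board.length - 1 - i + j))) 0
    have e4 := line_drop ((List.range i).map (fun j => getCell board (board.length - 1 - i + j) (board.length - 1 - j))) 0
    rw [e1, e2, e3, e4]
    ring
  rw [foldl_shift _ _ hA _ 0]
  rw [foldl_shift (fun t i =>
      t + lineScoreB ((List.range i).map (fun j => getCell board (i - j) j)) false
        + lineScoreB ((List.range i).map (fun j => getCell board (board.length - 1 - j) (i - j))) false
        + lineScoreB ((List.range i).map (fun j => getCell board j (board.length - 1 - i + j))) false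
        + lineScoreB ((List.range i).map (fun j => getCell board (board.length - 1 - i + j) (board.length - 1 - j))) false)
      (fun i => lineScoreB ((List.range i).map (fun j => getCell board (i - j) j)) false
        + lineScoreB ((List.range i).map (fun j => getCell board (board.length - 1 - j) (i - j))) false
        + lineScoreB ((List.range i).map (fun j => getCell board j (board.length - 1 - i + j))) false
        + lineScoreB ((List.range i).map (fun j => getCell board (board.length - 1 - i + j) (board.length - 1 - j))) false)
      (fun s i => by ring) _ 0]

theorem colTotB_init (board : List (List Int)) (t : Int) :
    colTotB board t = t + colTotB board 0 := by
  unfold colTotB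
  exact foldl_init _ (fun s t i => by ring) _ t

theorem diagTotB_init (board : List (List Int)) (t : Int) :
    diagTotB board t = t + diagTotB board 0 := by
  unfold diagTotB
  exact foldl_init _ (fun s t i => by ring) _ t

-- ===== VERDICT (by name: the statement is the Claim_ definition above) =====
theorem static_eval_spec : Claim_equal_static_eval := by
  intro board _ _
  unfold Spec_static_eval static_eval static_eval_alt
  rw [hscoreA_eq, vscoreA_eq, dscoreA_eq,
      diagTotB_init board (colTotB board (rowTotB board)),
      colTotB_init board (rowTotB board)]
  ring
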